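-- pv_equiv track=rewrite | github.com/luckkyzhou/leetcode | 1065.py | indexPairs
-- ===== SOURCE A (Python) =====
-- from typing import List
--
-- def indexPairs(text: str, words: List[str]) -> List[List[int]]:
--     res = []
--     wordset = set()
--     for word in words: wordset.add(word)
--     for i in range(len(text)):
--         for j in range(i, len(text)):
--             if text[i:j+1] in wordset: res.append([i, j])
--     return res
-- ===== SOURCE B (Python) =====
-- from typing import List
--
-- def indexPairs(text: str, words: List[str]) -> List[List[int]]:
--     wordset = set(words)
--     lens = sorted({len(w) for w in wordset if w})
--     n = len(text)
--     res = []
--     for i in range(n):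
--         for L in lens:
--             if i + L <= n and text[i:i+L] in wordset:
--                 res.append([i, i + L - 1])
--     return res
-- ===== Notes on version B (the rewrite author's own statement) =====
-- stated objective: faster
-- what changed: Instead of testing every substring text[i:j+1] for all O(n^2) pairs (i,j), B precomputes the sorted set of distinct word lengths and, for each start i, only probes the substrings of those lengths against the word set.
import Mathlib
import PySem

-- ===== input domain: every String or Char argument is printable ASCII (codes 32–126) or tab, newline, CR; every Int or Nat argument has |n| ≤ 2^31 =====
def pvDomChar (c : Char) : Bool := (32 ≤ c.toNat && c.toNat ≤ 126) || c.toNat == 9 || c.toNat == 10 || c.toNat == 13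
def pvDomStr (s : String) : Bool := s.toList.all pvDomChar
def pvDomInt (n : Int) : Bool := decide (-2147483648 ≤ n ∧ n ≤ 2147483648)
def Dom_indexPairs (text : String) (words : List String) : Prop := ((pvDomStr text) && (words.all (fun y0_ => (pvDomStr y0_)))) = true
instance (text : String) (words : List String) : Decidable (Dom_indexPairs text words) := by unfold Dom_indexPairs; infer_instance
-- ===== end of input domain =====

-- B replaces A's scan over all O(n^2) substring end positions by a scan, for each start
-- index, over the sorted distinct word lengths only (objective: faster; measured).


-- ===== PORT A =====
def indexPairs (text : String) (words : List String) : List (List Int) :=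
  let wordset : PySem.Set String := words.foldl (fun s w => PySem.Set.add s w) PySem.Set.empty
  (PySem.List.pyRange 0 (PySem.Str.len text) 1).foldl (fun res i =>
    (PySem.List.pyRange i (PySem.Str.len text) 1).foldl (fun res j =>
      if PySem.Set.contains wordset (PySem.Str.slice text (some i) (some (j + 1))) then
        res ++ [[i, j]]
      else res) res) []

-- ===== PORT B =====
def indexPairs_alt (text : String) (words : List String) : List (List Int) :=
  let wordset : PySem.Set String := PySem.Set.ofList words
  let lens : List Int :=
    PySem.List.sorted (PySem.Set.ofList ((wordset.filter (fun w => !(w == ""))).map PySem.Str.len)) (fun L => L)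
  let n : Int := PySem.Str.len text
  (PySem.List.pyRange 0 n 1).foldl (fun res i =>
    lens.foldl (fun res L =>
      if decide (i + L ≤ n) && PySem.Set.contains wordset (PySem.Str.slice text (some i) (some (i + L))) then
        res ++ [[i, i + L - 1]]
      else res) res) []

-- ===== PRECONDITION & SPEC =====
def Spec_indexPairs (text : String) (words : List String) (out : List (List Int)) : Prop := out = indexPairs_alt text words
instance (text : String) (words : List String) (out : List (List Int)) : Decidable (Spec_indexPairs text words out) := by unfold Spec_indexPairs; infer_instance

-- ===== CLAIM (what is proved, stated in full; the proofs are below) =====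
def Claim_equal_indexPairs : Prop := ∀ (text : String) (words : List String), Dom_indexPairs text words → Spec_indexPairs text words (indexPairs text words)

-- ===== LEMMAS AND PROOFS =====

-- Two strictly increasing integer lists with the same members are equal.
lemma pv_eq_of_pairwise_lt_mem (xs ys : List Int)
    (hx : xs.Pairwise (· < ·)) (hy : ys.Pairwise (· < ·))
    (h : ∀ x, x ∈ xs ↔ x ∈ ys) : xs = ys := by
  have hnx : xs.Nodup := hx.imp (fun {a b} hab => ne_of_lt hab)
  have hny : ys.Nodup := hy.imp (fun {a b} hab => ne_of_lt hab)
  exact List.Perm.eq_of_pairwise (fun a b _ _ h1 h2 => le_antisymm h1 h2)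
    (hx.imp le_of_lt) (hy.imp le_of_lt) ((List.perm_ext_iff_of_nodup hnx hny).mpr h)

-- Length of text[a:b] for 0 ≤ a ≤ b ≤ len(text).
lemma pv_slice_len (text : String) (a b : Int) (h0 : 0 ≤ a) (hab : a ≤ b)
    (hb : b ≤ (text.toList.length : Int)) :
    ((PySem.Str.slice text (some a) (some b)).toList.length : Int) = b - a := by
  have hbridge : (PySem.Str.slice text (some a) (some b)).toList
      = PySem.List.slice text.toList (some a) (some b) := by
    simp [PySem.Str.slice, PySem.Chars.slice]
  rw [hbridge, PySem.List.slice_toNat text.toList (a := a) (b := b) h0 (le_trans h0 hab)]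
  rw [List.length_take, List.length_drop]
  omega

-- 'for x in l: if p x: res.append(f x)' starting from [] is a flatMap.
lemma pv_foldl_outer {α β : Type} (l : List α) (f : List β → α → List β) (g : α → List β)
    (h : ∀ (acc : List β), ∀ i ∈ l, f acc i = acc ++ g i) :
    l.foldl f [] = l.flatMap g := by
  rw [PySem.List.foldl_congr_mem l f (fun acc i => acc ++ g i) [] h,
    PySem.List.foldl_append_eq_flatMap]
  simp

theorem indexPairs_spec : Claim_equal_indexPairs := by
  intro text words _
  unfold Spec_indexPairs indexPairs indexPairs_alt
  have hlen : PySem.Str.len text = (text.toList.length : Int) := PySem.Str.len_eq text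
  have hWfold : words.foldl (fun s w => PySem.Set.add s w) PySem.Set.empty
      = PySem.Set.ofList words := rfl
  rw [hWfold]
  rw [pv_foldl_outer _ _
      (fun i => ((PySem.List.pyRange i (PySem.Str.len text) 1).filter
          (fun j => PySem.Set.contains (PySem.Set.ofList words) (PySem.Str.slice text (some i) (some (j + 1))))).map
          (fun j => [i, j]))
      (fun acc i _ => PySem.List.foldl_append_if
        (fun j => PySem.Set.contains (PySem.Set.ofList words) (PySem.Str.slice text (some i) (some (j + 1))))
        (fun j => [i, j]) _ acc),
    pv_foldl_outer (PySem.List.pyRange 0 (PySem.Str.len text) 1)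
      (fun res i =>
        (PySem.List.sorted (PySem.Set.ofList
            (((PySem.Set.ofList words).filter (fun w => !(w == ""))).map PySem.Str.len)) (fun L => L)).foldl
          (fun res L =>
            if decide (i + L ≤ (PySem.Str.len text)) && PySem.Set.contains (PySem.Set.ofList words) (PySem.Str.slice text (some i) (some (i + L))) then
              res ++ [[i, i + L - 1]]
            else res) res)
      (fun i => ((PySem.List.sorted (PySem.Set.ofList
            (((PySem.Set.ofList words).filter (fun w => !(w == ""))).map PySem.Str.len)) (fun L => L)).filter
          (fun L => decide (i + L ≤ (PySem.Str.len text)) && PySem.Set.contains (PySem.Set.ofList words) (PySem.Str.slice text (some i) (some (i + L))))).map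
          (fun L => [i, i + L - 1]))
      (fun acc i _ => PySem.List.foldl_append_if
        (fun L => decide (i + L ≤ (PySem.Str.len text)) && PySem.Set.contains (PySem.Set.ofList words) (PySem.Str.slice text (some i) (some (i + L))))
        (fun L => [i, i + L - 1]) _ acc)]
  simp only [List.flatMap_def]
  apply congrArg
  apply List.map_congr_left
  intro i hi
  rw [PySem.List.mem_pyRange_one] at hi
  have key : (PySem.List.pyRange i (PySem.Str.len text) 1).filter
        (fun j => PySem.Set.contains (PySem.Set.ofList words) (PySem.Str.slice text (some i) (some (j + 1))))
      = ((PySem.List.sorted (PySem.Set.ofList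
            (((PySem.Set.ofList words).filter (fun w => !(w == ""))).map PySem.Str.len)) (fun L => L)).filter
          (fun L => decide (i + L ≤ (PySem.Str.len text)) && PySem.Set.contains (PySem.Set.ofList words) (PySem.Str.slice text (some i) (some (i + L))))).map
          (fun L => i + L - 1) := by
    apply pv_eq_of_pairwise_lt_mem
    · exact (PySem.List.pairwise_lt_pyRange_one i (PySem.Str.len text)).filter _
    · exact List.Pairwise.map (R := fun a b => a < b) _ (fun a b hab => by omega)
        ((PySem.List.sorted_ofList_pairwise_lt (((PySem.Set.ofList words).filter (fun w => !(w == ""))).map PySem.Str.len)).filter _)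
    · intro x
      constructor
      · intro hx
        rw [List.mem_filter, PySem.List.mem_pyRange_one] at hx
        obtain ⟨⟨hix, hxn⟩, hcon⟩ := hx
        rw [PySem.Set.contains_iff, PySem.Set.mem_ofList] at hcon
        have hwlen : ((PySem.Str.slice text (some i) (some (x + 1))).toList.length : Int)
            = x + 1 - i := pv_slice_len text i (x + 1) (by omega) (by omega) (by omega)
        refine List.mem_map.mpr ⟨x - i + 1, ?_, by omega⟩
        rw [List.mem_filter, PySem.List.mem_sorted, PySem.Set.mem_ofList]
        refine ⟨List.mem_map.mpr ⟨PySem.Str.slice text (some i) (some (x + 1)), ?_, ?_⟩, ?_⟩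
        · rw [List.mem_filter]
          refine ⟨PySem.Set.mem_ofList words _ |>.mpr hcon, ?_⟩
          simp only [Bool.not_eq_eq_eq_not, Bool.not_true, beq_eq_false_iff_ne, ne_eq]
          intro hcontra
          rw [hcontra] at hwlen
          simp at hwlen; omega
        · rw [PySem.Str.len_eq, hwlen]; omega
        · have h1 : i + (x - i + 1) = x + 1 := by omega
          rw [h1, Bool.and_eq_true, decide_eq_true_eq, PySem.Set.contains_iff, PySem.Set.mem_ofList]
          exact ⟨by omega, hcon⟩
      · intro hx
        obtain ⟨L, hLmem, hxL⟩ := List.mem_map.mp hx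
        rw [List.mem_filter] at hLmem
        obtain ⟨hLlens, hLcond⟩ := hLmem
        rw [Bool.and_eq_true, decide_eq_true_eq] at hLcond
        obtain ⟨hLle, hcon⟩ := hLcond
        rw [PySem.List.mem_sorted, PySem.Set.mem_ofList] at hLlens
        obtain ⟨w, hwmem, hwlen⟩ := List.mem_map.mp hLlens
        rw [List.mem_filter] at hwmem
        have hwne : w ≠ "" := by
          have := hwmem.2
          simp only [Bool.not_eq_eq_eq_not, Bool.not_true, beq_eq_false_iff_ne, ne_eq] at this
          exact this
        have hL1 : 1 ≤ L := by
          rw [PySem.Str.len_eq] at hwlen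
          rcases Nat.eq_zero_or_pos w.toList.length with h0 | h0
          · exact absurd (String.toList_eq_nil_iff.mp (List.length_eq_zero_iff.mp h0)) hwne
          · omega
        rw [List.mem_filter, PySem.List.mem_pyRange_one]
        have h2 : x = i + L - 1 := by omega
        refine ⟨⟨by omega, by omega⟩, ?_⟩
        have h3 : x + 1 = i + L := by omega
        rw [h3]
        exact hcon
  rw [key, List.map_map]
  rfl
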